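-- pv_equiv track=rewrite | github.com/uiheonn/backendServer | emaillist2/views.py | arrayfilter
-- ===== SOURCE A (Python) =====
-- def arrayfilter(txt):
--     a =[]
--     i = 2
--     j = 2
--     n = len(txt)
--     while i < n-2:
--         if txt[i] == ",":
--             a.append(txt[j:i])
--             j = i + 1
--         i+=1
--     a.append(txt[j:i])
--     return a
-- ===== SOURCE B (Python) =====
-- def arrayfilter(txt):
--     # Trim two characters off each end, then let str.split do the comma tokenizing.
--     return txt[2:len(txt)-2].split(',')
-- ===== Notes on version B (the rewrite author's own statement) =====
-- stated objective: idiomatic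
-- what changed: Replaces A's index-driven while loop with manual comma scanning and slice bookkeeping by a single slice of the trimmed interior followed by the standard-library str.split(','), which yields the identical list including the [''] degenerate case.
import Mathlib
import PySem

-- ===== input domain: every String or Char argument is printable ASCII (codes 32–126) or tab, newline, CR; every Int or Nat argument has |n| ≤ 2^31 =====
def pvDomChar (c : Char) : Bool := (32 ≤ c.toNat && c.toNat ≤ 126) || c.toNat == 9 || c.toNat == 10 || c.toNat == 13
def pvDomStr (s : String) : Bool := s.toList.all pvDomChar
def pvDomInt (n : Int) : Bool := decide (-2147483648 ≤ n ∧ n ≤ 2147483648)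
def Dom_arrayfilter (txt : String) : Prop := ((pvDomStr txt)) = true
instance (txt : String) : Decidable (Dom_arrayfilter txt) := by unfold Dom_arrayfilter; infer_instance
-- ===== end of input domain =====

-- B replaces A's index-driven scan-and-append while loop by slicing off two characters
-- at each end and handing the interior to the standard-library str.split(',') (idiomatic; the
-- timing run measured the C-level split faster by a constant factor).

-- ===== PORT A =====
-- the while loop of A: state (i, j, a); txt[i] via pyGet?, txt[j:i] via slice
def arrayfilterGo (txt : String) (n i j : Int) (a : List String) : List String :=
  if i < n - 2 then
    (if PySem.Str.pyGet? txt i = some ',' then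
      arrayfilterGo txt n (i + 1) (i + 1) (a ++ [PySem.Str.slice txt (some j) (some i)])
    else
      arrayfilterGo txt n (i + 1) j a)
  else
    a ++ [PySem.Str.slice txt (some j) (some i)]
termination_by (n - 2 - i).toNat
decreasing_by all_goals omega

def arrayfilter (txt : String) : List String :=
  arrayfilterGo txt (PySem.Str.len txt) 2 2 []

-- ===== PORT B =====
-- txt[2:len(txt)-2].split(',')  — separator is the nonempty literal ",", so split? is never none
def arrayfilter_alt (txt : String) : List String :=
  match PySem.Str.split? (PySem.Str.slice txt (some 2) (some (PySem.Str.len txt - 2))) "," with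
  | some parts => parts
  | none => []

-- ===== PRECONDITION & SPEC =====
def Spec_arrayfilter (txt : String) (out : List String) : Prop := out = arrayfilter_alt txt
instance (txt : String) (out : List String) : Decidable (Spec_arrayfilter txt out) := by unfold Spec_arrayfilter; infer_instance

-- ===== CLAIM (what is proved, stated in full; the proofs are below) =====
def Claim_equal_arrayfilter : Prop := ∀ (txt : String), Dom_arrayfilter txt → Spec_arrayfilter txt (arrayfilter txt)

-- ===== LEMMAS AND PROOFS =====

-- prepend a pending segment onto the first piece of a split (helper for both invariants)
def glueSeg (p : List Char) : List (List Char) → List (List Char)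
  | [] => [p]
  | h :: r => (p ++ h) :: r

-- structural recursion splitting a char list on ','
def splitComma : List Char → List (List Char)
  | [] => [[]]
  | c :: t => if c = ',' then [] :: splitComma t else glueSeg [c] (splitComma t)

theorem glueSeg_ne_nil (p : List Char) (xs : List (List Char)) : glueSeg p xs ≠ [] := by
  cases xs <;> simp [glueSeg]

theorem splitComma_ne_nil (l : List Char) : splitComma l ≠ [] := by
  cases l with
  | nil => simp [splitComma]
  | cons c t =>
      simp only [splitComma]
      split_ifs <;> simp [glueSeg_ne_nil]

theorem glueSeg_nil (xs : List (List Char)) (h : xs ≠ []) : glueSeg [] xs = xs := by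
  cases xs with
  | nil => exact absurd rfl h
  | cons a r => simp [glueSeg]

theorem glueSeg_glueSeg (p q : List Char) (xs : List (List Char)) :
    glueSeg p (glueSeg q xs) = glueSeg (p ++ q) xs := by
  cases xs <;> simp [glueSeg]

-- PySem's fuel-based splitOn.go, characterised for the one-char separator [',']
theorem splitOn_go_comma (l : List Char) : ∀ (fuel : Nat) (cur : List Char)
    (acc : List (List Char)), l.length < fuel →
    PySem.Chars.splitOn.go [','] fuel l cur acc
      = acc.reverse ++ glueSeg cur.reverse (splitComma l) := by
  induction l with
  | nil =>
      intro fuel cur acc hf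
      match fuel, hf with
      | fuel + 1, _ => simp [PySem.Chars.splitOn.go, splitComma, glueSeg]
  | cons c rest ih =>
      intro fuel cur acc hf
      match fuel, hf with
      | fuel + 1, hf =>
        by_cases hc : c = ','
        · subst hc
          rw [show PySem.Chars.splitOn.go [','] (fuel + 1) (',' :: rest) cur acc
              = PySem.Chars.splitOn.go [','] fuel rest [] (cur.reverse :: acc) by
            simp [PySem.Chars.splitOn.go, List.isPrefixOf]]
          rw [ih fuel [] (cur.reverse :: acc) (by simpa using hf)]
          rw [List.reverse_nil, glueSeg_nil _ (splitComma_ne_nil rest)]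
          simp [splitComma, glueSeg]
        · rw [show PySem.Chars.splitOn.go [','] (fuel + 1) (c :: rest) cur acc
              = PySem.Chars.splitOn.go [','] fuel rest (c :: cur) acc by
            simp [PySem.Chars.splitOn.go, List.isPrefixOf, Ne.symm hc]]
          rw [ih fuel (c :: cur) acc (by simpa using hf)]
          simp [splitComma, hc, glueSeg_glueSeg]

theorem splitOn_comma (l : List Char) : PySem.Chars.splitOn l [','] = splitComma l := by
  rw [show PySem.Chars.splitOn l [','] = PySem.Chars.splitOn.go [','] (l.length + 1) l [] [] from rfl]
  rw [splitOn_go_comma l (l.length + 1) [] [] (by omega)]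
  simpa using glueSeg_nil _ (splitComma_ne_nil l)

-- B's port, rewritten through splitComma of the interior
theorem alt_eq_splitComma (txt : String) :
    arrayfilter_alt txt
      = ((splitComma (PySem.List.slice txt.toList (some 2)
          (some ((txt.toList.length : Int) - 2)))).map String.ofList) := by
  unfold arrayfilter_alt
  rw [show PySem.Str.split? (PySem.Str.slice txt (some 2) (some (PySem.Str.len txt - 2))) ","
      = some (((PySem.Chars.splitOn
          (PySem.List.slice txt.toList (some 2) (some ((txt.toList.length : Int) - 2)))
          [','])).map String.ofList) by
    simp [PySem.Str.split?, PySem.Chars.split?, PySem.Str.slice, PySem.Chars.slice,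
      PySem.Str.len, PySem.Chars.splitOn, String.toList_ofList]]
  rw [splitOn_comma]

-- the loop invariant for A's while loop (Nat indices; N ≥ 4 is forced by 2 ≤ j ≤ i ≤ N - 2)
theorem go_inv (txt : String) : ∀ (k i j : Nat) (a : List String),
    k = txt.toList.length - 2 - i → 2 ≤ j → j ≤ i → i ≤ txt.toList.length - 2 →
    arrayfilterGo txt (txt.toList.length : Int) (i : Int) (j : Int) a
      = a ++ ((glueSeg ((txt.toList.drop j).take (i - j))
          (splitComma ((txt.toList.drop i).take (txt.toList.length - 2 - i)))).map String.ofList) := by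
  intro k
  induction k with
  | zero =>
      intro i j a hk hj hji hi
      have hN : txt.toList.length - 2 = i := by omega
      rw [arrayfilterGo]
      rw [if_neg (by omega)]
      simp only [hN, Nat.sub_self, List.take_zero, splitComma, glueSeg]
      simp [PySem.Str.slice, PySem.Chars.slice, PySem.List.slice_natCast]
  | succ k ih =>
      intro i j a hk hj hji hi
      have hiN : i < txt.toList.length - 2 := by omega
      have hilt : i < txt.toList.length := by omega
      rw [arrayfilterGo]
      rw [if_pos (by omega)]
      have hget : PySem.Str.pyGet? txt (i : Int) = some (txt.toList[i]) := by
        simp [PySem.Str.pyGet?, PySem.Chars.pyGet?, PySem.List.pyGet?_natCast,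
          List.getElem?_eq_getElem hilt]
      have hdrop : txt.toList.drop i = txt.toList[i] :: txt.toList.drop (i + 1) :=
        List.drop_eq_getElem_cons hilt
      have htake : (txt.toList.drop i).take (txt.toList.length - 2 - i)
          = txt.toList[i] :: (txt.toList.drop (i + 1)).take (txt.toList.length - 2 - (i + 1)) := by
        rw [hdrop, show txt.toList.length - 2 - i = (txt.toList.length - 2 - (i + 1)) + 1 by omega,
          List.take_succ_cons]
      by_cases hc : txt.toList[i] = ','
      · rw [if_pos (by rw [hget, hc])]
        rw [show ((i : Int) + 1) = ((i + 1 : Nat) : Int) by push_cast; ring]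
        rw [ih (i + 1) (i + 1) _ (by omega) (by omega) (by omega) (by omega)]
        rw [htake, hc]
        simp only [splitComma]
        rw [Nat.sub_self, List.take_zero, glueSeg_nil _ (splitComma_ne_nil _)]
        simp only [glueSeg, List.append_assoc, List.singleton_append]
        congr 1
        simp [PySem.Str.slice, PySem.Chars.slice, PySem.List.slice_natCast]
      · rw [if_neg (by rw [hget]; simpa using hc)]
        rw [show ((i : Int) + 1) = ((i + 1 : Nat) : Int) by push_cast; ring]
        rw [ih (i + 1) j _ (by omega) (by omega) (by omega) (by omega)]
        rw [htake]
        simp only [splitComma, if_neg hc]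
        rw [glueSeg_glueSeg]
        congr 2
        rw [show i + 1 - j = (i - j) + 1 by omega, List.take_add_one,
          List.getElem?_drop, show j + (i - j) = i by omega,
          List.getElem?_eq_getElem hilt]
        rfl

-- degenerate trimming: length < 4 makes the interior slice empty
theorem slice_interior_nil (l : List Char) (h : l.length < 4) :
    PySem.List.slice l (some 2) (some ((l.length : Int) - 2)) = [] := by
  have hlen := PySem.List.length_slice l 2 ((l.length : Int) - 2)
  have hc2 : PySem.List.clampIdx l.length 2 = min 2 l.length := by
    simp [PySem.List.clampIdx]
  have hcb : PySem.List.clampIdx l.length ((l.length : Int) - 2) ≤ min 2 l.length := by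
    simp only [PySem.List.clampIdx]
    split_ifs <;> omega
  have : (PySem.List.slice l (some 2) (some ((l.length : Int) - 2))).length = 0 := by omega
  exact List.eq_nil_of_length_eq_zero this

-- ===== VERDICT (by name: the statement is the Claim_ definition above) =====
theorem arrayfilter_spec : Claim_equal_arrayfilter := by
  intro txt _
  unfold Spec_arrayfilter
  rw [alt_eq_splitComma]
  unfold arrayfilter
  rw [show PySem.Str.len txt = (txt.toList.length : Int) from rfl]
  by_cases h4 : 4 ≤ txt.toList.length
  · rw [show ((2 : Int)) = ((2 : Nat) : Int) by norm_num]
    rw [go_inv txt (txt.toList.length - 2 - 2) 2 2 [] rfl (by omega) (by omega) (by omega)]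
    rw [Nat.sub_self, List.take_zero, glueSeg_nil _ (splitComma_ne_nil _)]
    rw [show (txt.toList.length : Int) - ((2:Nat):Int) = ((txt.toList.length - 2 : Nat) : Int) by
      push_cast; omega]
    rw [PySem.List.slice_natCast]
    simp
  · rw [arrayfilterGo, if_neg (by omega)]
    rw [slice_interior_nil txt.toList (by omega)]
    simp only [splitComma, List.map, PySem.Str.slice, PySem.Chars.slice,
      List.nil_append]
    rw [List.eq_nil_of_length_eq_zero (l := PySem.List.slice txt.toList (some 2) (some 2))
      (by rw [PySem.List.length_slice]; omega)]
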